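-- pv_equiv track=rewrite | github.com/ooopad2oopas2/HumaCalcXXI | main.py | lucas_mod
-- ===== SOURCE A (Python) =====
-- class Hc21ComplexityError(RuntimeError):
--     pass
--
-- def lucas_mod(index: int, mod: int) -> int:
--     if mod < 3:
--         raise Hc21ComplexityError("modulus")
--     if index == 0:
--         return 2 % mod
--     if index == 1:
--         return 1 % mod
--     a, b = 2 % mod, 1 % mod
--     for _ in range(2, index + 1):
--         a, b = b, (a + b) % mod
--     return b
-- ===== SOURCE B (Python) =====
-- class Hc21ComplexityError(RuntimeError):
--     pass
--
-- def lucas_mod(index: int, mod: int) -> int: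
--     if mod < 3:
--         raise Hc21ComplexityError("modulus")
--     if index < 0:
--         raise Hc21ComplexityError("index")
--
--     def fib_pair(n):
--         # (F(n), F(n+1)) mod `mod` by fast doubling
--         if n == 0:
--             return (0, 1)
--         f, g = fib_pair(n >> 1)
--         a = (f * (2 * g - f)) % mod
--         b = (f * f + g * g) % mod
--         if n & 1:
--             return (b, (a + b) % mod)
--         return (a, b)
--
--     f, g = fib_pair(index)
--     return (2 * g - f) % mod
-- ===== Notes on version B (the rewrite author's own statement) =====
-- stated objective: faster
-- what changed: Replaced the O(index) linear recurrence loop with recursive fast-doubling on Fibonacci pairs mod m (L(n) = 2*F(n+1) - F(n)), O(log index) multiplications.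
-- outside the precondition, e.g. on lucas_mod(-2, 5): A returns 1, B raises Hc21ComplexityError
import Mathlib
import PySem

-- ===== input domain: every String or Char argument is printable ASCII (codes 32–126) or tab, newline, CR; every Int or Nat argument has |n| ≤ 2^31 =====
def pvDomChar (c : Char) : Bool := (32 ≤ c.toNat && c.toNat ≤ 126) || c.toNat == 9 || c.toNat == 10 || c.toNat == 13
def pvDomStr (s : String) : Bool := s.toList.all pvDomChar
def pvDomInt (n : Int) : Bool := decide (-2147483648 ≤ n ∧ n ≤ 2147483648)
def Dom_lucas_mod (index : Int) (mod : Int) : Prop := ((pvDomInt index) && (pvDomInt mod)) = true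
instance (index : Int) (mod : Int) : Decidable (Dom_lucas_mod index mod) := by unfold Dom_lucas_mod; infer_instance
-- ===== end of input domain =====

-- B replaces A's O(index) linear loop by fast doubling on Fibonacci pairs mod m (L(n) = 2*F(n+1) - F(n)); equivalence proved for mod ≥ 3 and index ≥ 0.


-- ===== PORT A =====
-- literal port of A; where the Python raises Hc21ComplexityError (mod < 3) the port returns 0 — excluded by Pre_
def lucas_mod (index : Int) (mod : Int) : Int :=
  if mod < 3 then 0
  else if index = 0 then PySem.Int.mod 2 mod
  else if index = 1 then PySem.Int.mod 1 mod
  else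
    ((PySem.List.pyRange 2 (index + 1) 1).foldl
      (fun (ab : Int × Int) _ => (ab.2, PySem.Int.mod (ab.1 + ab.2) mod))
      (PySem.Int.mod 2 mod, PySem.Int.mod 1 mod)).2

-- ===== PORT B =====
-- fib_pair from Source B: (F(n), F(n+1)) mod `mod` by fast doubling; n is a Nat since Source B raises on index < 0
def fibPair (mod : Int) (n : Nat) : Int × Int :=
  if h : n = 0 then (0, 1)
  else
    let p := fibPair mod (n / 2)
    let a := PySem.Int.mod (p.1 * (2 * p.2 - p.1)) mod
    let b := PySem.Int.mod (p.1 * p.1 + p.2 * p.2) mod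
    if n % 2 = 1 then (b, PySem.Int.mod (a + b) mod) else (a, b)
  termination_by n
  decreasing_by exact Nat.div_lt_self (Nat.pos_of_ne_zero h) one_lt_two

-- literal port of Source B; where Source B raises (mod < 3 or index < 0) the port returns 0 — excluded by Pre_
def lucas_mod_alt (index : Int) (mod : Int) : Int :=
  if mod < 3 then 0
  else if index < 0 then 0
  else
    let p := fibPair mod index.toNat
    PySem.Int.mod (2 * p.2 - p.1) mod

-- ===== PRECONDITION & SPEC =====
-- Pre_ excludes mod < 3, on which A raises Hc21ComplexityError, and index < 0, on which A's
-- return of 1 % mod is leftover initial loop state and B's fast-doubling raises instead.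
def Pre_lucas_mod (index : Int) (mod : Int) : Prop := 3 ≤ mod ∧ 0 ≤ index
instance (index : Int) (mod : Int) : Decidable (Pre_lucas_mod index mod) := by unfold Pre_lucas_mod; infer_instance
def pvWitness_lucas_mod : Int × Int := (5, 7)

def Spec_lucas_mod (index : Int) (mod : Int) (out : Int) : Prop := out = lucas_mod_alt index mod
instance (index : Int) (mod : Int) (out : Int) : Decidable (Spec_lucas_mod index mod out) := by unfold Spec_lucas_mod; infer_instance

-- ===== CLAIM (what is proved, stated in full; the proofs are below) =====
def Claim_equal_lucas_mod : Prop := ∀ (index : Int) (mod : Int), Dom_lucas_mod index mod → Pre_lucas_mod index mod → Spec_lucas_mod index mod (lucas_mod index mod)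

-- ===== LEMMAS AND PROOFS =====

-- the Lucas sequence (exact integers, no mod)
def luc : Nat → Int
  | 0 => 2
  | 1 => 1
  | n + 2 => luc n + luc (n + 1)

theorem luc_fib : ∀ n : Nat, luc n = 2 * (Nat.fib (n + 1) : Int) - (Nat.fib n : Int) := by
  intro n
  induction n using Nat.twoStepInduction with
  | zero => simp [luc]
  | one => simp [luc]
  | more n ih1 ih2 =>
    have e2 : Nat.fib (n + 2) = Nat.fib n + Nat.fib (n + 1) := Nat.fib_add_two
    have e3 : Nat.fib (n + 3) = Nat.fib (n + 1) + Nat.fib (n + 2) := Nat.fib_add_two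
    simp only [luc, ih1, ih2, show n + 2 + 1 = n + 3 from rfl, e3, e2]
    push_cast
    ring

-- fold over a list with an element-ignoring step is function iteration
theorem foldl_iterate {α β : Type} (f : α → α) (l : List β) (init : α) :
    l.foldl (fun a _ => f a) init = f^[l.length] init := by
  induction l generalizing init with
  | nil => rfl
  | cons x xs ih => simp [List.foldl_cons, ih, Function.iterate_succ_apply]

set_option maxRecDepth 8192 in
theorem pyRange_len (M : Nat) : (PySem.List.pyRange 2 ((M + 2 : Nat) + 1) 1).length = M + 1 := by
  rw [PySem.List.pyRange_of_pos 2 ((M + 2 : Nat) + 1) one_pos,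
    if_pos (by push_cast; omega : (2:Int) < (M + 2 : Nat) + 1)]
  rw [List.length_map, List.length_range]
  simp only [Int.ediv_one]
  push_cast
  omega

theorem emod_self_modEq (m x : Int) : x % m ≡ x [ZMOD m] :=
  Int.emod_emod_of_dvd x dvd_rfl

theorem fibPair_eq (m : Int) (hm : 3 ≤ m) :
    ∀ n : Nat, fibPair m n = ((Nat.fib n : Int) % m, (Nat.fib (n + 1) : Int) % m) := by
  intro n
  induction n using Nat.strong_induction_on with
  | _ n ih =>
    unfold fibPair
    by_cases h0 : n = 0
    · subst h0
      simp [Int.emod_eq_of_lt (by omega : (0:Int) ≤ 1) (by omega : (1:Int) < m)]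
    · rw [dif_neg h0]
      have hm0 : (0:Int) < m := by omega
      rw [ih (n / 2) (Nat.div_lt_self (Nat.pos_of_ne_zero h0) one_lt_two)]
      set k := n / 2 with hk
      simp only [PySem.Int.mod_eq_emod_of_pos hm0]
      have hf := emod_self_modEq m (Nat.fib k : Int)
      have hg := emod_self_modEq m (Nat.fib (k + 1) : Int)
      have hle : Nat.fib k ≤ 2 * Nat.fib (k + 1) :=
        le_trans (Nat.fib_le_fib_succ) (by omega)
      have hA : ((Nat.fib k : Int) % m * (2 * ((Nat.fib (k+1) : Int) % m) - (Nat.fib k : Int) % m)) % m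
          = (Nat.fib (2 * k) : Int) % m := by
        have h1 : ((Nat.fib k : Int) % m * (2 * ((Nat.fib (k+1) : Int) % m) - (Nat.fib k : Int) % m))
            ≡ (Nat.fib k : Int) * (2 * (Nat.fib (k+1) : Int) - (Nat.fib k : Int)) [ZMOD m] :=
          hf.mul ((hg.mul_left 2).sub hf)
        have h2 : (Nat.fib (2 * k) : Int)
            = (Nat.fib k : Int) * (2 * (Nat.fib (k+1) : Int) - (Nat.fib k : Int)) := by
          rw [Nat.fib_two_mul]
          push_cast [Nat.cast_sub hle]
          ring
        rw [h2]; exact h1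
      have hB : ((Nat.fib k : Int) % m * ((Nat.fib k : Int) % m)
            + (Nat.fib (k+1) : Int) % m * ((Nat.fib (k+1) : Int) % m)) % m
          = (Nat.fib (2 * k + 1) : Int) % m := by
        have h1 : ((Nat.fib k : Int) % m * ((Nat.fib k : Int) % m)
              + (Nat.fib (k+1) : Int) % m * ((Nat.fib (k+1) : Int) % m))
            ≡ (Nat.fib k : Int) * (Nat.fib k : Int)
              + (Nat.fib (k+1) : Int) * (Nat.fib (k+1) : Int) [ZMOD m] :=
          (hf.mul hf).add (hg.mul hg)
        have h2 : (Nat.fib (2 * k + 1) : Int)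
            = (Nat.fib k : Int) * (Nat.fib k : Int)
              + (Nat.fib (k+1) : Int) * (Nat.fib (k+1) : Int) := by
          rw [Nat.fib_two_mul_add_one]; push_cast; ring
        rw [h2]; exact h1
      by_cases hpar : n % 2 = 1
      · rw [if_pos hpar]
        have hn : n = 2 * k + 1 := by omega
        have hsum : ((Nat.fib (2*k) : Int) % m + (Nat.fib (2*k+1) : Int) % m) % m
            = (Nat.fib (2*k+2) : Int) % m := by
          have h1 : (Nat.fib (2*k) : Int) % m + (Nat.fib (2*k+1) : Int) % m
              ≡ (Nat.fib (2*k) : Int) + (Nat.fib (2*k+1) : Int) [ZMOD m] :=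
            (emod_self_modEq m _).add (emod_self_modEq m _)
          have h2 : (Nat.fib (2*k+2) : Int) = (Nat.fib (2*k) : Int) + (Nat.fib (2*k+1) : Int) := by
            rw [Nat.fib_add_two]; push_cast; ring
          rw [h2]; exact h1
        simp only [hA, hB, hsum]
        rw [hn]
      · rw [if_neg hpar]
        have hn : n = 2 * k := by omega
        simp only [hA, hB]
        rw [hn]

-- A's loop: iterating the step from (L0 % m, L1 % m) walks the Lucas sequence mod m
theorem iter_lucas_step (m : Int) :
    ∀ l : Nat, (fun ab : Int × Int => (ab.2, (ab.1 + ab.2) % m))^[l] (2 % m, 1 % m)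
      = (luc l % m, luc (l + 1) % m) := by
  intro l
  induction l with
  | zero => simp [luc]
  | succ l ih =>
    rw [Function.iterate_succ_apply', ih]
    have h2 : luc (l + 2) % m = (luc l % m + luc (l + 1) % m) % m := by
      have h1 : luc l % m + luc (l + 1) % m ≡ luc l + luc (l + 1) [ZMOD m] :=
        (emod_self_modEq m _).add (emod_self_modEq m _)
      have : luc (l + 2) = luc l + luc (l + 1) := rfl
      rw [this]; exact h1.symm
    simp only [h2.symm]

-- B's final line computes luc N % m
theorem alt_val (m : Int) (hm : 3 ≤ m) (N : Nat) :
    PySem.Int.mod (2 * (fibPair m N).2 - (fibPair m N).1) m = luc N % m := by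
  have hm0 : (0:Int) < m := by omega
  rw [fibPair_eq m hm N, PySem.Int.mod_eq_emod_of_pos hm0]
  have h1 : 2 * ((Nat.fib (N+1) : Int) % m) - (Nat.fib N : Int) % m
      ≡ 2 * (Nat.fib (N+1) : Int) - (Nat.fib N : Int) [ZMOD m] :=
    ((emod_self_modEq m _).mul_left 2).sub (emod_self_modEq m _)
  calc (2 * ((Nat.fib (N+1) : Int) % m) - (Nat.fib N : Int) % m) % m
      = (2 * (Nat.fib (N+1) : Int) - (Nat.fib N : Int)) % m := h1
    _ = luc N % m := by rw [luc_fib N]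

-- ===== VERDICT (by name: the statement is the Claim_ definition above) =====
theorem lucas_mod_spec : Claim_equal_lucas_mod := by
  intro index mod _ hpre
  obtain ⟨hm, hi⟩ := hpre
  have hm0 : (0:Int) < mod := by omega
  unfold Spec_lucas_mod lucas_mod lucas_mod_alt
  rw [if_neg (by omega : ¬ mod < 3), if_neg (by omega : ¬ mod < 3),
    if_neg (by omega : ¬ index < 0)]
  obtain ⟨N, rfl⟩ : ∃ N : Nat, index = (N : Int) := ⟨index.toNat, (Int.toNat_of_nonneg hi).symm⟩
  rw [Int.toNat_natCast, alt_val mod hm N]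
  obtain _ | _ | M := N
  · simp [PySem.Int.mod_eq_emod_of_pos hm0, luc]
  · simp [PySem.Int.mod_eq_emod_of_pos hm0, luc]
  · rw [if_neg (by push_cast; omega), if_neg (by push_cast; omega)]
    simp only [PySem.Int.mod_eq_emod_of_pos hm0]
    rw [foldl_iterate (fun ab : Int × Int => (ab.2, (ab.1 + ab.2) % mod))]
    rw [pyRange_len M, iter_lucas_step mod (M + 1)]
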